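-- pv_equiv track=rewrite | github.com/doogrammargood/notes | class_notes/code_tracing_exercises/packet_2/Packet/ex_7.py | calculate
-- ===== SOURCE A (Python) =====
-- def calculate(x):
--     total = 0
--     for i in range(x):
--         if i % 2 == 0:
--             total = total + (i * 2)
--         else:
--             total = total + (i - 1)
--     return total
-- ===== SOURCE B (Python) =====
-- def calculate(x):
--     if x <= 0:
--         return 0
--     e = (x + 1) // 2   # number of even i in range(x)
--     o = x // 2         # number of odd i in range(x)
--     return 2 * e * (e - 1) + o * (o - 1)
-- ===== Notes on version B (the rewrite author's own statement) =====
-- stated objective: faster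
-- what changed: Replaced the O(x) loop over range(x) with a closed-form split of the sum into its even-index and odd-index arithmetic series.
import Mathlib
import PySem

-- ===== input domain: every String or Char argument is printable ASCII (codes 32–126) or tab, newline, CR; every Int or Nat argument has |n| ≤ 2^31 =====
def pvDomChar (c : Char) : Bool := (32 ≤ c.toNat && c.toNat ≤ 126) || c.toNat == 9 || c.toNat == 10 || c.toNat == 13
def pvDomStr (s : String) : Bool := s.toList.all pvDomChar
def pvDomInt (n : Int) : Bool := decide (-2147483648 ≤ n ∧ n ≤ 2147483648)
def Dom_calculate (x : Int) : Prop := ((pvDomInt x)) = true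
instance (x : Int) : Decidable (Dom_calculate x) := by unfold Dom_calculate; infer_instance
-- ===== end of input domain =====

-- B replaces A's loop over range(x) with a closed form: the sum split into its even- and odd-index arithmetic series.

-- ===== PORT A =====
def calculate (x : Int) : Int :=
  (PySem.List.pyRange 0 x 1).foldl
    (fun total i => if PySem.Int.mod i 2 = 0 then total + i * 2 else total + (i - 1)) 0

-- ===== PORT B =====
def calculate_alt (x : Int) : Int :=
  if x ≤ 0 then 0
  else
    let e := PySem.Int.floordiv (x + 1) 2
    let o := PySem.Int.floordiv x 2
    2 * e * (e - 1) + o * (o - 1)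

-- ===== PRECONDITION & SPEC =====
def Spec_calculate (x : Int) (out : Int) : Prop := out = calculate_alt x
instance (x : Int) (out : Int) : Decidable (Spec_calculate x out) := by unfold Spec_calculate; infer_instance

-- ===== CLAIM (what is proved, stated in full; the proofs are below) =====
def Claim_equal_calculate : Prop := ∀ (x : Int), Dom_calculate x → Spec_calculate x (calculate x)

-- ===== LEMMAS AND PROOFS =====

-- closed form of the B port for a positive natural argument, with floordiv turned into ediv
theorem calculate_alt_pos (n : Nat) (h : 0 < n) :
    calculate_alt (n : Int) =
      2 * (((n : Int) + 1) / 2) * ((((n : Int) + 1) / 2) - 1)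
        + ((n : Int) / 2) * (((n : Int) / 2) - 1) := by
  unfold calculate_alt
  rw [if_neg (by exact_mod_cast by omega : ¬ (n : Int) ≤ 0)]
  rw [PySem.Int.floordiv_eq_ediv_of_pos (by omega : (0:Int) < 2),
      PySem.Int.floordiv_eq_ediv_of_pos (by omega : (0:Int) < 2)]

theorem calculate_nat (n : Nat) : calculate (n : Int) = calculate_alt (n : Int) := by
  induction n with
  | zero =>
    unfold calculate calculate_alt
    rw [PySem.List.pyRange_one_eq_nil (by omega)]
    simp
  | succ m ih =>
    have hsplit : PySem.List.pyRange 0 ((m : Int) + 1) 1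
        = PySem.List.pyRange 0 (m : Int) 1 ++ [(m : Int)] :=
      PySem.List.pyRange_one_succ_right (by omega)
    unfold calculate at *
    push_cast
    rw [hsplit, List.foldl_append]
    simp only [List.foldl]
    rw [ih]
    by_cases hm0 : m = 0
    · subst hm0
      norm_num
      decide
    · rw [calculate_alt_pos m (by omega)]
      have h1 : ((m : Int) + 1 : Int) = ((m + 1 : Nat) : Int) := by push_cast; ring
      rw [h1, calculate_alt_pos (m + 1) (by omega)]
      rcases Nat.even_or_odd m with ⟨k, hk⟩ | ⟨k, hk⟩
      · have hmod : PySem.Int.mod (m : Int) 2 = 0 := by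
          rw [PySem.Int.mod_eq_emod_of_pos (by omega : (0:Int) < 2)]; omega
        rw [hmod]; simp only [if_pos]
        have hm : (m : Int) = 2 * (k : Int) := by omega
        have o1 : ((m : Int)) / 2 = (k : Int) := by omega
        have e2 : (((m + 1 : Nat) : Int) + 1) / 2 = (k : Int) + 1 := by push_cast; omega
        have o2 : (((m + 1 : Nat) : Int)) / 2 = (k : Int) := by push_cast; omega
        rw [o1, e2, o2, hm]; ring
      · have hmod : PySem.Int.mod (m : Int) 2 = 1 := by
          rw [PySem.Int.mod_eq_emod_of_pos (by omega : (0:Int) < 2)]; omega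
        rw [hmod]
        rw [if_neg (by omega : ¬ (1 : Int) = 0)]
        have hm : (m : Int) = 2 * (k : Int) + 1 := by omega
        have o1 : ((m : Int)) / 2 = (k : Int) := by omega
        have e2 : (((m + 1 : Nat) : Int) + 1) / 2 = (k : Int) + 1 := by push_cast; omega
        have o2 : (((m + 1 : Nat) : Int)) / 2 = (k : Int) + 1 := by push_cast; omega
        rw [o1, e2, o2, hm]; ring

-- ===== VERDICT (by name: the statement is the Claim_ definition above) =====
theorem calculate_spec : Claim_equal_calculate := by
  intro x _
  unfold Spec_calculate
  by_cases h : x ≤ 0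
  · unfold calculate calculate_alt
    rw [PySem.List.pyRange_one_eq_nil (by omega)]
    simp [h]
  · have hx : x = (x.toNat : Int) := by omega
    rw [hx, calculate_nat]
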